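-- pv_equiv track=rewrite | github.com/Abrama1/infohub-rag | app/retrieval.py | _lexical_score
-- ===== SOURCE A (Python) =====
-- def _lexical_score(text: str, stems: list[str]) -> int:
--     """
--     Score by how many stems appear in the chunk text.
--     """
--     t = (text or "").lower()
--     score = 0
--     for s in stems:
--         if not s:
--             continue
--         if s.isdigit():
--             # number match
--             if s in t:
--                 score += 2
--         else:
--             if s in t:
--                 score += 1
--     return score
-- ===== SOURCE B (Python) =====
-- def _lexical_score(text: str, stems: list[str]) -> int:
--     """
--     Score by how many stems appear in the chunk text.
--     Text-position-driven: walk every start position of the lowercased text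
--     once and flag each stem that begins there (naive multi-pattern scan),
--     then weight the stems by the flags.
--     """
--     t = (text or "").lower()
--     found = set()
--     for i in range(len(t) + 1):
--         for s in stems:
--             if s and t.startswith(s, i):
--                 found.add(s)
--     return sum(2 if s.isdigit() else 1 for s in stems if s in found)
-- ===== Notes on version B (the rewrite author's own statement) =====
-- stated objective: alternative
-- what changed: B inverts the traversal: instead of asking 's in t' per stem, it walks every start position of the lowercased text once, flags in a set each stem that begins at that position (a naive single-pass multi-pattern scan), and finally weights the stems by the flags.
import Mathlib
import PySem

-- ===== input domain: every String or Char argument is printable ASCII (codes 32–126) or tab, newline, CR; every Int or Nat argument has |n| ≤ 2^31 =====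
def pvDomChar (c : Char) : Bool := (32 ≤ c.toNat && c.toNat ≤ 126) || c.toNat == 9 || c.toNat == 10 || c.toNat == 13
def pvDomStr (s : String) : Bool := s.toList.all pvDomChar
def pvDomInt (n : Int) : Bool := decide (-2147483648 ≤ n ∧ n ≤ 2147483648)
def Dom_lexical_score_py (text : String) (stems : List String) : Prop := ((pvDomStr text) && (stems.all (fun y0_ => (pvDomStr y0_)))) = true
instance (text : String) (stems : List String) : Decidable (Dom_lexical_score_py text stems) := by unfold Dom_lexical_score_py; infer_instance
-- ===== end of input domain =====

-- B inverts the traversal: it walks the start positions of the lowercased text once,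
-- flagging in a set each stem that begins there, then weights stems by the flags
-- (objective: alternative; same observable result, no speed claim).

-- ===== PORT A =====
def lexical_score_py (text : String) (stems : List String) : Int :=
  let t := PySem.Str.lower (if text = "" then "" else text)
  stems.foldl (fun score s =>
    if s = "" then score
    else if PySem.Str.strIsdigit s then
      (if PySem.Str.isIn s t then score + 2 else score)
    else
      (if PySem.Str.isIn s t then score + 1 else score)) 0

-- ===== PORT B =====
-- B-side helper: the position-driven flagging loop ('for i in range(len(t)+1): for s in stems: …').
-- Every i from range(len(t)+1) is ≥ 0, so 't.startswith(s, i)' is exactly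
-- 'startswith' on 't.toList.drop i.toNat'.
def pvFound (t : String) (stems : List String) : PySem.Set String :=
  (PySem.List.pyRange 0 (PySem.Str.len t + 1) 1).foldl
    (fun f i => stems.foldl
      (fun f s =>
        if s ≠ "" ∧ PySem.Chars.startswith (t.toList.drop i.toNat) s.toList = true then
          PySem.Set.add f s else f) f)
    PySem.Set.empty
def lexical_score_py_alt (text : String) (stems : List String) : Int :=
  let t := PySem.Str.lower (if text = "" then "" else text)
  let found : PySem.Set String := pvFound t stems
  ((stems.filter (fun s => PySem.Set.contains found s)).map
    (fun s => if PySem.Str.strIsdigit s then (2 : Int) else 1)).sum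

-- ===== PRECONDITION & SPEC =====
def Spec_lexical_score_py (text : String) (stems : List String) (out : Int) : Prop := out = lexical_score_py_alt text stems
instance (text : String) (stems : List String) (out : Int) : Decidable (Spec_lexical_score_py text stems out) := by unfold Spec_lexical_score_py; infer_instance

-- ===== CLAIM (what is proved, stated in full; the proofs are below) =====
def Claim_equal_lexical_score_py : Prop := ∀ (text : String) (stems : List String), Dom_lexical_score_py text stems → Spec_lexical_score_py text stems (lexical_score_py text stems)

-- ===== LEMMAS AND PROOFS =====

-- weight a stem contributes in A
def pvW (t s : String) : Int :=
  if s = "" then 0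
  else if PySem.Str.isIn s t then (if PySem.Str.strIsdigit s then 2 else 1) else 0

theorem pv_A_eq (t : String) (l : List String) :
    l.foldl (fun score s =>
      if s = "" then score
      else if PySem.Str.strIsdigit s then
        (if PySem.Str.isIn s t then score + 2 else score)
      else
        (if PySem.Str.isIn s t then score + 1 else score)) 0
      = (l.map (pvW t)).sum := by
  have hstep : (fun (score : Int) (s : String) =>
      if s = "" then score
      else if PySem.Str.strIsdigit s then
        (if PySem.Str.isIn s t then score + 2 else score)
      else
        (if PySem.Str.isIn s t then score + 1 else score))
      = fun score s => score + pvW t s := by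
    funext score s
    by_cases h0 : s = ""
    · simp [pvW, h0]
    · by_cases h1 : PySem.Chars.strIsdigit s.toList <;>
        by_cases h2 : PySem.Chars.isIn s.toList t.toList <;>
          simp [pvW, h0, h1, h2]
  rw [hstep, PySem.List.foldl_add]
  simp

-- membership in the inner conditional-add fold
theorem pv_mem_inner (p : String → Prop) [DecidablePred p]
    (l : List String) (f0 : PySem.Set String) (y : String) :
    y ∈ l.foldl (fun f s => if p s then PySem.Set.add f s else f) f0
      ↔ y ∈ f0 ∨ (y ∈ l ∧ p y) := by
  induction l generalizing f0 with
  | nil => simp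
  | cons x xs ih =>
    rw [List.foldl_cons, ih]
    by_cases hx : p x
    · simp only [hx, if_pos, PySem.Set.mem_add, List.mem_cons]
      constructor
      · rintro ((h | rfl) | h)
        · exact Or.inl h
        · exact Or.inr ⟨Or.inl rfl, hx⟩
        · exact Or.inr ⟨Or.inr h.1, h.2⟩
      · rintro (h | ⟨(rfl | h), hp⟩)
        · exact Or.inl (Or.inl h)
        · exact Or.inl (Or.inr rfl)
        · exact Or.inr ⟨h, hp⟩
    · simp only [hx, if_neg, not_false_iff, List.mem_cons]
      constructor
      · rintro (h | h)
        · exact Or.inl h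
        · exact Or.inr ⟨Or.inr h.1, h.2⟩
      · rintro (h | ⟨(rfl | h), hp⟩)
        · exact Or.inl h
        · exact absurd hp hx
        · exact Or.inr ⟨h, hp⟩

-- membership in the position-driven double fold
theorem pv_mem_outer (q : Int → String → Prop) [∀ i s, Decidable (q i s)]
    (stems : List String) (I : List Int) (f0 : PySem.Set String) (y : String) :
    y ∈ I.foldl (fun f i => stems.foldl (fun f s => if q i s then PySem.Set.add f s else f) f) f0
      ↔ y ∈ f0 ∨ ∃ i ∈ I, y ∈ stems ∧ q i y := by
  induction I generalizing f0 with
  | nil => simp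
  | cons j J ih =>
    rw [List.foldl_cons, ih, pv_mem_inner]
    constructor
    · rintro ((h | ⟨hy, hq⟩) | ⟨i, hi, hy, hq⟩)
      · exact Or.inl h
      · exact Or.inr ⟨j, List.mem_cons_self, hy, hq⟩
      · exact Or.inr ⟨i, List.mem_cons_of_mem _ hi, hy, hq⟩
    · rintro (h | ⟨i, hi, hy, hq⟩)
      · exact Or.inl (Or.inl h)
      · rcases List.mem_cons.mp hi with rfl | hi
        · exact Or.inl (Or.inr ⟨hy, hq⟩)
        · exact Or.inr ⟨i, hi, hy, hq⟩

-- a bounded start position exists iff the substring occurs (for nonempty stems)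
theorem pv_pos_iff_isIn (t s : String) (hs : s ≠ "") :
    (∃ i ∈ PySem.List.pyRange 0 (PySem.Str.len t + 1) 1,
        PySem.Chars.startswith (t.toList.drop i.toNat) s.toList = true)
      ↔ PySem.Chars.isIn s.toList t.toList = true := by
  constructor
  · rintro ⟨i, _, hst⟩
    exact (PySem.Chars.exists_prefix_drop_iff_isIn s.toList t.toList).mp
      ⟨i.toNat, (PySem.Chars.startswith_iff _ _).mp hst⟩
  · intro hin
    obtain ⟨j, hj⟩ := (PySem.Chars.exists_prefix_drop_iff_isIn s.toList t.toList).mpr hin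
    have hjle : j ≤ t.toList.length := by
      by_contra hgt
      push Not at hgt
      rw [List.drop_eq_nil_of_le (le_of_lt hgt)] at hj
      exact hs (String.toList_eq_nil_iff.mp (List.prefix_nil.mp hj))
    refine ⟨(j : Int), ?_, ?_⟩
    · rw [PySem.List.mem_pyRange_one]
      constructor
      · exact Int.natCast_nonneg j
      · simp only [PySem.Str.len_eq]
        omega
    · simpa using (PySem.Chars.startswith_iff _ _).mpr hj
    
-- filtered-map sum = pointwise ite sum
theorem pv_filter_map_sum (l : List String) (q : String → Bool) (g : String → Int) :
    ((l.filter q).map g).sum = (l.map (fun s => if q s then g s else 0)).sum := by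
  induction l with
  | nil => rfl
  | cons x xs ih =>
    by_cases h : q x <;> simp [h, ih]

-- membership in the flag set = the stem is a nonempty listed stem occurring in t
theorem pv_found_iff (t : String) (stems : List String) (s : String) :
    s ∈ pvFound t stems ↔ s ∈ stems ∧ s ≠ "" ∧ PySem.Chars.isIn s.toList t.toList = true := by
  unfold pvFound
  rw [pv_mem_outer]
  constructor
  · rintro (h | ⟨i, hi, hys, hne, hst⟩)
    · simp [PySem.Set.empty] at h
    · exact ⟨hys, hne, (pv_pos_iff_isIn t s hne).mp ⟨i, hi, hst⟩⟩
  · rintro ⟨hys, hne, hin⟩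
    obtain ⟨i, hi, hst⟩ := (pv_pos_iff_isIn t s hne).mpr hin
    exact Or.inr ⟨i, hi, hys, hne, hst⟩

-- pointwise: B's flag-weight of a listed stem is A's weight
theorem pv_B_pointwise (t : String) (stems : List String) (s : String) (hs : s ∈ stems) :
    (if PySem.Set.contains (pvFound t stems) s then
        (if PySem.Str.strIsdigit s then (2 : Int) else 1) else 0) = pvW t s := by
  by_cases hc : s ∈ pvFound t stems
  · obtain ⟨_, hne, hin⟩ := (pv_found_iff t stems s).mp hc
    simp only [pvW, hne]
    simp [hin]
    exact fun h => absurd hc h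
  · rw [pv_found_iff] at hc
    by_cases h0 : s = ""
    · simp [pvW, h0]
      intro h
      exact absurd rfl ((pv_found_iff t stems "").mp h).2.1
    · have hni : ¬ PySem.Chars.isIn s.toList t.toList = true := fun hin => hc ⟨hs, h0, hin⟩
      simp [pvW, h0, hni]
      intro h
      exact absurd ((pv_found_iff t stems s).mp h).2.2 hni

-- ===== VERDICT (by name: the statement is the Claim_ definition above) =====
theorem lexical_score_py_spec : Claim_equal_lexical_score_py := by
  intro text stems _
  unfold Spec_lexical_score_py lexical_score_py lexical_score_py_alt
  dsimp only
  rw [pv_A_eq, pv_filter_map_sum]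
  exact congrArg List.sum
    (List.map_congr_left (fun s hs =>
      (pv_B_pointwise (PySem.Str.lower (if text = "" then "" else text)) stems s hs).symm))
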